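-- pv_equiv track=rewrite | github.com/Programmerryoki/Competitive-Programming | Atcoder/AHC 005/A2.py | printNonContLst
-- ===== SOURCE A (Python) =====
-- rev = {"U":"D","D":"U","L":"R","R":"L"}
--
-- def printNonContLst(lst, pathtonode):
--     ans = ""
--     if pathtonode:
--         lst = lst[1:]
--         ans += pathtonode[lst[0]]
--     tmp = lst[0]
--     for i in range(1, len(lst)):
--         nxt = lst[i]
--         dif = [tmp[0]-nxt[0], tmp[1]-nxt[1]]
--         if dif[0] != 0:
--             ans += ("UD"[dif[0] < 0])*(abs(dif[0]))
--         else: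
--             ans += ("LR"[dif[1] < 0])*(abs(dif[1]))
--         tmp = nxt
--     return ans + "".join(rev[w] for w in ans[::-1])
-- ===== SOURCE B (Python) =====
-- rev = {"U": "D", "D": "U", "L": "R", "R": "L"}
--
-- def printNonContLst(lst, pathtonode):
--     if pathtonode:
--         lst = lst[1:]
--         prefix = pathtonode[lst[0]]
--     else:
--         prefix = ""
--     # single pass over the out-and-back coordinate walk: the outward leg and the
--     # return leg are emitted by the SAME loop; only the prefix needs the rev mirror.
--     full = lst + lst[::-1]
--     out = []
--     for a, b in zip(full, full[1:]):
--         dx = a[0] - b[0]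
--         if dx != 0:
--             out.append(("UD"[dx < 0]) * abs(dx))
--         else:
--             dy = a[1] - b[1]
--             out.append(("LR"[dy < 0]) * abs(dy))
--     return prefix + "".join(out) + "".join(rev[w] for w in reversed(prefix))
-- ===== Notes on version B (the rewrite author's own statement) =====
-- stated objective: alternative
-- what changed: A builds the outward string and then reverses-and-remaps the whole of it through the rev table; B instead forms the out-and-back coordinate walk full = lst + lst[::-1] and emits both legs in one forward pass over its consecutive pairs (the equal junction pair contributes nothing), so only the prefix still goes through the rev-table mirror.
import Mathlib
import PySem

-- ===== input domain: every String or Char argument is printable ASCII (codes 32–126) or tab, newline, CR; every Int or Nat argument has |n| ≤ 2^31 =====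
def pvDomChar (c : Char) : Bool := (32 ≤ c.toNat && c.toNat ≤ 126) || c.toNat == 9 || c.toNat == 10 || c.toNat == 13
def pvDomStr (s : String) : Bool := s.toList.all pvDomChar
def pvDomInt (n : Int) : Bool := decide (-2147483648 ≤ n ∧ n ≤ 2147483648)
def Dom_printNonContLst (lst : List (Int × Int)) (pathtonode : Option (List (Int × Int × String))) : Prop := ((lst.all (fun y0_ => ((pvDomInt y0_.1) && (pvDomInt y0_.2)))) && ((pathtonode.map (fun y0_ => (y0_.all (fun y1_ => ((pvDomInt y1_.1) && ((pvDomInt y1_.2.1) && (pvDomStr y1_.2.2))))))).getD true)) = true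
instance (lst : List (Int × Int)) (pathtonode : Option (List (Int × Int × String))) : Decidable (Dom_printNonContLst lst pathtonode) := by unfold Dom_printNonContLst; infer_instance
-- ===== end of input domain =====

-- B emits the outward leg and the return leg in ONE forward pass over the out-and-back
-- coordinate walk lst ++ lst.reverse instead of reversing and remapping the emitted
-- string; equality of return values is proved on Pre_ below.

-- ===== PORT A =====
-- the module-level dict rev = {"U":"D","D":"U","L":"R","R":"L"}; for a char outside
-- the table Python raises KeyError (excluded by Pre_), here it is returned unchanged
def pvRev (c : Char) : Char :=
  if c = 'U' then 'D' else if c = 'D' then 'U'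
  else if c = 'L' then 'R' else if c = 'R' then 'L' else c

-- pathtonode[k]: dict lookup (first match on the coordinate pair); none = KeyError
def pvLookup (d : List (Int × Int × String)) (k : Int × Int) : Option String :=
  match d with
  | [] => none
  | (a, b, s) :: t => if a = k.1 ∧ b = k.2 then some s else pvLookup t k

-- one iteration of A's for-loop: state (tmp, ans)
def pvStepA (st : (Int × Int) × List Char) (nxt : Int × Int) : (Int × Int) × List Char :=
  let dif := (st.1.1 - nxt.1, st.1.2 - nxt.2)
  if dif.1 ≠ 0 then
    (nxt, st.2 ++ List.replicate dif.1.natAbs (if dif.1 < 0 then 'D' else 'U'))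
  else
    (nxt, st.2 ++ List.replicate dif.2.natAbs (if dif.2 < 0 then 'R' else 'L'))

def printNonContLst (lst : List (Int × Int)) (pathtonode : Option (List (Int × Int × String))) : String :=
  -- if pathtonode: lst = lst[1:]; ans += pathtonode[lst[0]]  (KeyError/IndexError excluded by Pre_)
  let st :=
    match pathtonode with
    | some d =>
      if d = [] then (lst, ([] : List Char))
      else
        let lst := lst.drop 1
        (lst, ((pvLookup d ((PySem.List.pyGet? lst 0).getD (0, 0))).getD "").toList)
    | none => (lst, ([] : List Char))
  let lst := st.1
  let tmp := (PySem.List.pyGet? lst 0).getD (0, 0)   -- lst[0]; IndexError excluded by Pre_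
  let r := (lst.drop 1).foldl pvStepA (tmp, st.2)    -- for i in range(1, len(lst))
  String.ofList (r.2 ++ r.2.reverse.map pvRev)           -- ans + "".join(rev[w] for w in ans[::-1])

-- ===== PORT B =====
-- B's dict lookup, written with find? (first matching key, value projected out)
def pvFindB (d : List (Int × Int × String)) (k : Int × Int) : Option String :=
  (d.find? (fun e => e.1 == k.1 && e.2.1 == k.2)).map (fun e => e.2.2)

def printNonContLst_alt (lst : List (Int × Int)) (pathtonode : Option (List (Int × Int × String))) : String :=
  let pn := pathtonode.getD []
  let l := if pn = [] then lst else lst.drop 1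
  let pre := if pn = [] then ([] : List Char)
             else ((pvFindB pn ((PySem.List.pyGet? l 0).getD (0, 0))).getD "").toList
  let full := l ++ l.reverse                           -- full = lst + lst[::-1]
  let mid := (full.zip (full.drop 1)).flatMap (fun p => -- for a, b in zip(full, full[1:])
    let dx := p.1.1 - p.2.1
    if dx ≠ 0 then List.replicate dx.natAbs (if dx < 0 then 'D' else 'U')
    else
      let dy := p.1.2 - p.2.2
      List.replicate dy.natAbs (if dy < 0 then 'R' else 'L'))
  String.ofList (pre ++ mid ++ pre.reverse.map pvRev)

-- ===== PRECONDITION & SPEC =====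
def pvOkChar (c : Char) : Bool := c == 'U' || c == 'D' || c == 'L' || c == 'R'

-- Pre_ excludes exactly the inputs on which the Python A raises: an empty walk (IndexError
-- at lst[0]), and, when pathtonode is truthy, fewer than two points (IndexError), a missing
-- key lst[1] (KeyError), or a prefix string with a char outside "UDLR" (KeyError in rev).
def Pre_printNonContLst (lst : List (Int × Int)) (pathtonode : Option (List (Int × Int × String))) : Prop :=
  if pathtonode.getD [] = [] then lst ≠ []   -- pathtonode falsy (None or {})
  else 2 ≤ lst.length ∧
    (((pathtonode.getD []).find?
        (fun e => (e.1, e.2.1) == (PySem.List.pyGet? lst 1).getD (0, 0))).map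
      (fun e => e.2.2.toList.all pvOkChar)).getD false = true

instance (lst : List (Int × Int)) (pathtonode : Option (List (Int × Int × String))) : Decidable (Pre_printNonContLst lst pathtonode) := by unfold Pre_printNonContLst; infer_instance

def pvWitness_printNonContLst : (List (Int × Int)) × (Option (List (Int × Int × String))) :=
  ([(0, 0), (1, 0), (1, 2)], some [(1, 0, "UR")])

def Spec_printNonContLst (lst : List (Int × Int)) (pathtonode : Option (List (Int × Int × String))) (out : String) : Prop := out = printNonContLst_alt lst pathtonode
instance (lst : List (Int × Int)) (pathtonode : Option (List (Int × Int × String))) (out : String) : Decidable (Spec_printNonContLst lst pathtonode out) := by unfold Spec_printNonContLst; infer_instance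

-- ===== CLAIM (what is proved, stated in full; the proofs are below) =====
def Claim_equal_printNonContLst : Prop := ∀ (lst : List (Int × Int)) (pathtonode : Option (List (Int × Int × String))), Dom_printNonContLst lst pathtonode → Pre_printNonContLst lst pathtonode → Spec_printNonContLst lst pathtonode (printNonContLst lst pathtonode)

-- ===== LEMMAS AND PROOFS =====

-- the direction run of one consecutive pair (proof-only; both ports inline this)
def pvSeg (a b : Int × Int) : List Char :=
  let dx := a.1 - b.1
  if dx ≠ 0 then List.replicate dx.natAbs (if dx < 0 then 'D' else 'U')
  else
    let dy := a.2 - b.2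
    List.replicate dy.natAbs (if dy < 0 then 'R' else 'L')

-- the two dict lookups agree
theorem pvFindB_eq (d : List (Int × Int × String)) (k : Int × Int) :
    pvFindB d k = pvLookup d k := by
  induction d with
  | nil => rfl
  | cons e t ih =>
    obtain ⟨a, b, s⟩ := e
    by_cases h : a = k.1 ∧ b = k.2
    · simp [pvFindB, pvLookup, List.find?, h.1, h.2]
    · have : (a == k.1 && b == k.2) = false := by
        simp only [Bool.and_eq_false_iff, beq_eq_false_iff_ne, ne_eq]
        by_cases h1 : a = k.1
        · exact Or.inr (fun h2 => h ⟨h1, h2⟩)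
        · exact Or.inl h1
      simp [pvFindB, pvLookup, List.find?, this, h, ← ih]

-- one step of A's loop emits exactly pvSeg tmp nxt
theorem pvStepA_eq (tmp nxt : Int × Int) (ans : List Char) :
    pvStepA (tmp, ans) nxt = (nxt, ans ++ pvSeg tmp nxt) := by
  simp only [pvStepA, pvSeg]
  split <;> rfl

-- A's loop, run from head tmp over rest, appends the forward leg of tmp :: rest
theorem foldl_stepA (rest : List (Int × Int)) :
    ∀ (tmp : Int × Int) (ans : List Char),
      (rest.foldl pvStepA (tmp, ans)).2
        = ans ++ (((tmp :: rest).zip rest).map (fun p => pvSeg p.1 p.2)).flatten := by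
  induction rest with
  | nil => intro tmp ans; simp
  | cons y ys ih =>
    intro tmp ans
    simp only [List.foldl_cons, pvStepA_eq, ih y, List.zip_cons_cons, List.map_cons,
      List.flatten_cons, List.append_assoc]

-- reversing a segment and remapping it through rev is the segment of the opposite move
theorem pvSeg_rev (a b : Int × Int) : (pvSeg a b).reverse.map pvRev = pvSeg b a := by
  obtain ⟨a1, a2⟩ := a; obtain ⟨b1, b2⟩ := b
  simp only [pvSeg]
  by_cases h : a1 - b1 = 0
  · have h' : b1 - a1 = 0 := by omega
    simp only [h, h', ne_eq, not_true_eq_false, if_false, List.reverse_replicate,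
      List.map_replicate]
    rcases lt_trichotomy (a2 - b2) 0 with hd | hd | hd
    · have : ¬ (b2 - a2 < 0) := by omega
      simp [hd, this, pvRev]; omega
    · have h2 : b2 - a2 = 0 := by omega
      simp [hd, h2]
    · have : b2 - a2 < 0 := by omega
      have h2 : ¬ (a2 - b2 < 0) := by omega
      simp [this, h2, pvRev]; omega
  · have h' : b1 - a1 ≠ 0 := by omega
    simp only [ne_eq, h, h', not_false_eq_true, if_true, List.reverse_replicate,
      List.map_replicate]
    rcases lt_trichotomy (a1 - b1) 0 with hd | hd | hd
    · have : ¬ (b1 - a1 < 0) := by omega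
      simp [hd, this, pvRev]; omega
    · omega
    · have : b1 - a1 < 0 := by omega
      have h2 : ¬ (a1 - b1 < 0) := by omega
      simp [this, h2, pvRev]; omega

-- the whole forward leg, reversed and remapped, is the backward leg
theorem leg_rev (pairs : List ((Int × Int) × (Int × Int))) :
    ((pairs.map (fun p => pvSeg p.1 p.2)).flatten).reverse.map pvRev
      = (pairs.reverse.map (fun p => pvSeg p.2 p.1)).flatten := by
  induction pairs with
  | nil => simp
  | cons p ps ih =>
    simp only [List.map_cons, List.flatten_cons, List.reverse_append, List.map_append, ih,
      List.reverse_cons, List.flatten_append, List.map_nil, List.flatten_nil, List.append_nil,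
      pvSeg_rev]

-- consecutive pairs of an append, when both parts are nonempty
theorem zip_consec_append {X : Type} (a b : List X) (ha : a ≠ []) (hb : b ≠ []) :
    (a ++ b).zip ((a ++ b).drop 1)
      = a.zip (a.drop 1) ++ (a.getLast ha, b.head hb) :: b.zip (b.drop 1) := by
  induction a with
  | nil => exact absurd rfl ha
  | cons x a' ih =>
    cases a' with
    | nil =>
      cases b with
      | nil => exact absurd rfl hb
      | cons y ys => simp
    | cons x2 a'' =>
      have h := ih (by simp)
      simp only [List.cons_append, List.drop_succ_cons, List.drop_zero] at h ⊢
      rw [List.zip_cons_cons, h, List.zip_cons_cons]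
      simp [List.getLast_cons]

-- consecutive pairs of a reversed list are the swapped, reversed consecutive pairs
theorem zip_consec_reverse {X : Type} (l : List X) :
    l.reverse.zip (l.reverse.drop 1)
      = ((l.zip (l.drop 1)).reverse).map Prod.swap := by
  induction l with
  | nil => rfl
  | cons x xs ih =>
    cases xs with
    | nil => rfl
    | cons y ys =>
      have hrev : (y :: ys).reverse ≠ [] := by simp
      rw [show (x :: y :: ys).reverse = (y :: ys).reverse ++ [x] from List.reverse_cons ..,
        zip_consec_append ((y :: ys).reverse) [x] hrev (by simp), ih]
      simp

-- the junction pair of the out-and-back walk contributes nothing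
theorem pvSeg_self (p : Int × Int) : pvSeg p p = [] := by
  simp [pvSeg]

-- B's single pass over l ++ l.reverse is the forward leg followed by the backward leg
theorem mid_eq (l : List (Int × Int)) :
    (((l ++ l.reverse).zip ((l ++ l.reverse).drop 1)).map (fun p => pvSeg p.1 p.2)).flatten
      = ((l.zip (l.drop 1)).map (fun p => pvSeg p.1 p.2)).flatten
        ++ (((l.zip (l.drop 1)).reverse).map (fun p => pvSeg p.2 p.1)).flatten := by
  cases l with
  | nil => rfl
  | cons x xs =>
    rw [zip_consec_append (x :: xs) (x :: xs).reverse (by simp) (by simp),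
      List.head_reverse, zip_consec_reverse]
    simp only [List.map_append, List.map_cons, List.flatten_append, List.flatten_cons,
      pvSeg_self, List.nil_append, List.map_map]
    rfl

-- the common core: A's tail computation equals B's single pass, for any list and prefix
theorem core_eq (l : List (Int × Int)) (pre : List Char) :
    (let tmp := (PySem.List.pyGet? l 0).getD (0, 0)
     let r := (l.drop 1).foldl pvStepA (tmp, pre)
     String.ofList (r.2 ++ r.2.reverse.map pvRev))
    = String.ofList (pre ++
        (((l ++ l.reverse).zip ((l ++ l.reverse).drop 1)).map (fun p => pvSeg p.1 p.2)).flatten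
        ++ pre.reverse.map pvRev) := by
  cases l with
  | nil => simp
  | cons x xs =>
    have h0 : (PySem.List.pyGet? (x :: xs) (0 : Int)).getD ((0 : Int), (0 : Int)) = x := by
      simp [PySem.List.pyGet?, PySem.List.pyIdx?]
    simp only [List.drop_succ_cons, List.drop_zero, h0, foldl_stepA xs x pre, mid_eq,
      List.reverse_append, List.map_append, leg_rev, List.append_assoc]

-- the inline lambda in B's port is pvSeg
theorem flatMap_seg (ps : List ((Int × Int) × (Int × Int))) :
    ps.flatMap (fun p =>
      let dx := p.1.1 - p.2.1
      if dx ≠ 0 then List.replicate dx.natAbs (if dx < 0 then 'D' else 'U')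
      else
        let dy := p.1.2 - p.2.2
        List.replicate dy.natAbs (if dy < 0 then 'R' else 'L'))
      = (ps.map (fun p => pvSeg p.1 p.2)).flatten := rfl

-- ===== VERDICT (by name: the statement is the Claim_ definition above) =====
theorem printNonContLst_spec : Claim_equal_printNonContLst := by
  intro lst pathtonode _dom _pre
  unfold Spec_printNonContLst printNonContLst printNonContLst_alt
  simp only [flatMap_seg, pvFindB_eq]
  cases pathtonode with
  | none => simpa using core_eq lst []
  | some d =>
    cases d with
    | nil => simpa using core_eq lst []
    | cons e es =>
      simp only [Option.getD_some, if_neg (by simp : ¬ (e :: es = []))]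
      exact core_eq (lst.drop 1) _
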